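-- pv_equiv track=rewrite | github.com/lake041/sesac-algorithm | 김민재/프로그래머스/PCCP 기출문제/[PCCP 기출문제] 2번.py | solution
-- ===== SOURCE A (Python) =====
-- from collections import deque
-- from itertools import product
--
-- dy = [-1, 0, 1, 0]
--
-- dx = [0, 1, 0, -1]
--
-- def solution(land):
--     R, C = len(land), len(land[0])
--     visited = [[False]*C for _ in range(R)]
--     memo = [0]*C
--
--     for cy, cx in product(range(R), range(C)):
--         if visited[cy][cx] or land[cy][cx]==0:
--             continue
--
--         cols = set()
--         cnt = 0
--
--         q = deque([(cy, cx)])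
--         visited[cy][cx] = True
--         cnt += 1
--         cols.add(cx)
--         while q:
--             y, x = q.popleft()
--             for u, v in zip(dy, dx):
--                 ny, nx = y+u, x+v
--                 if 0<=ny<R and 0<=nx<C and not visited[ny][nx] and land[ny][nx]==1:
--                     q.append((ny, nx))
--                     visited[ny][nx] = True
--                     cnt += 1
--                     cols.add(nx)
--
--         for x in cols:
--             memo[x] += cnt
--
--     return max(memo)
-- ===== SOURCE B (Python) =====
-- def solution(land):
--     R, C = len(land), len(land[0])
--     visited = set()
--     memo = [0] * C
--     for cy in range(R):
--         for cx in range(C):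
--             if (cy, cx) in visited or land[cy][cx] == 0:
--                 continue
--             comp = {(cy, cx)}
--             frontier = {(cy, cx)}
--             while True:
--                 new = set()
--                 for (y, x) in frontier:
--                     for ny, nx in ((y - 1, x), (y, x + 1), (y + 1, x), (y, x - 1)):
--                         if 0 <= ny < R and 0 <= nx < C and (ny, nx) not in comp \
--                                 and (ny, nx) not in visited and land[ny][nx] == 1:
--                             new.add((ny, nx))
--                 if not new:
--                     break
--                 comp |= new
--                 frontier = new
--             visited |= comp
--             cnt = len(comp)
--             for x in {x for (y, x) in comp}:
--                 memo[x] += cnt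
--     return max(memo)
-- ===== Notes on version B (the rewrite author's own statement) =====
-- stated objective: alternative
-- what changed: replaces the cell-at-a-time deque BFS over a boolean visited matrix with incremental counters by level-synchronous frontier-set expansion over coordinate sets, deriving component size and column set from the finished component
import Mathlib
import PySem

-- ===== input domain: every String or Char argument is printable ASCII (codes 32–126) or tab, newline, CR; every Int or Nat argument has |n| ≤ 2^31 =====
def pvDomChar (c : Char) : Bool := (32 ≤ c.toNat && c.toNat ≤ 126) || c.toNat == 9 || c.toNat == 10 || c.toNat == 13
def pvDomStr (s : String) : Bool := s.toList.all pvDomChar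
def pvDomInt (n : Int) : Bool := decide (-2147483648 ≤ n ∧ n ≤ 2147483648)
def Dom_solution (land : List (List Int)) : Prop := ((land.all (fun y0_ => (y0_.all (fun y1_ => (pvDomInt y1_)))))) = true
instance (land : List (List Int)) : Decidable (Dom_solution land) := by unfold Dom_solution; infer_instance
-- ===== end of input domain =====

-- B replaces the deque BFS over a boolean visited matrix (cell-at-a-time, incremental counters)
-- by level-synchronous frontier-set expansion over coordinate sets, deriving the size and the
-- column set from the finished component; same cost, different structure ("alternative").

-- ===== PORT A =====
-- land[y][x]; callers always guard 0<=y<R, 0<=x<C, and Pre_ guarantees the row is long enough,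
-- so the total pyGetD form is exact there.
def landAt (land : List (List Int)) (y x : Int) : Int :=
  PySem.List.pyGetD (PySem.List.pyGetD land y []) x 0

-- visited[y][x] read / write (guarded by 0<=y<R and 0<=x<C at every call site, like the Python)
def mgetA (vis : List (List Bool)) (y x : Int) : Bool :=
  PySem.List.pyGetD (PySem.List.pyGetD vis y []) x false

def msetA (vis : List (List Bool)) (y x : Int) : List (List Bool) :=
  PySem.List.pySetD vis y (PySem.List.pySetD (PySem.List.pyGetD vis y []) x true)

-- list(zip(dy, dx))
def offsA : List (Int × Int) := [(-1, 0), (0, 1), (1, 0), (0, -1)]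

-- body of `for u, v in zip(dy, dx)`; state = (queue, visited, cnt, cols)
def stepA (land : List (List Int)) (R C y x : Int)
    (s : List (Int × Int) × List (List Bool) × Int × PySem.Set Int) (uv : Int × Int) :
    List (Int × Int) × List (List Bool) × Int × PySem.Set Int :=
  let ny := y + uv.1
  let nx := x + uv.2
  if 0 ≤ ny ∧ ny < R ∧ 0 ≤ nx ∧ nx < C ∧ mgetA s.2.1 ny nx = false ∧ landAt land ny nx = 1 then
    (s.1 ++ [(ny, nx)], msetA s.2.1 ny nx, s.2.2.1 + 1, PySem.Set.add s.2.2.2 nx)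
  else s

-- `while q:` — fuel is only a totality guard, never reached on runs from `solution`
def bfsA (land : List (List Int)) (R C : Int) :
    Nat → List (Int × Int) → List (List Bool) → Int → PySem.Set Int →
    List (List Bool) × Int × PySem.Set Int
  | _, [], vis, cnt, cols => (vis, cnt, cols)
  | 0, _ :: _, vis, cnt, cols => (vis, cnt, cols)
  | fuel + 1, (y, x) :: rest, vis, cnt, cols =>
      let s := List.foldl (stepA land R C y x) (rest, vis, cnt, cols) offsA
      bfsA land R C fuel s.1 s.2.1 s.2.2.1 s.2.2.2

def solution (land : List (List Int)) : Int :=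
  let R : Int := land.length
  let C : Int := (PySem.List.pyGetD land 0 []).length
  let cells := (PySem.List.pyRange 0 R 1).flatMap
      (fun cy => (PySem.List.pyRange 0 C 1).map (fun cx => (cy, cx)))
  let fin := cells.foldl
    (fun (st : List (List Bool) × List Int) c =>
      if mgetA st.1 c.1 c.2 = true ∨ landAt land c.1 c.2 = 0 then st
      else
        let r := bfsA land R C ((R * C).toNat + 1) [(c.1, c.2)] (msetA st.1 c.1 c.2) 1
                   (PySem.Set.add PySem.Set.empty c.2)
        (r.1, (r.2.2 : List Int).foldl
          (fun m x => PySem.List.pySetD m x (PySem.List.pyGetD m x 0 + r.2.1)) st.2))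
    (List.replicate R.toNat (List.replicate C.toNat false), List.replicate C.toNat (0 : Int))
  match PySem.List.max? fin.2 (fun v => v) with
  | some m => m
  | none => 0   -- Python raises ValueError here (empty memo); excluded by Pre_

-- ===== PORT B =====
def nbrsB (y x : Int) : List (Int × Int) := [(y - 1, x), (y, x + 1), (y + 1, x), (y, x - 1)]

def stepB (land : List (List Int)) (R C : Int) (comp visited : PySem.Set (Int × Int))
    (new : PySem.Set (Int × Int)) (c : Int × Int) : PySem.Set (Int × Int) :=
  if 0 ≤ c.1 ∧ c.1 < R ∧ 0 ≤ c.2 ∧ c.2 < C ∧ PySem.Set.contains comp c = false ∧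
      PySem.Set.contains visited c = false ∧ landAt land c.1 c.2 = 1 then
    PySem.Set.add new c
  else new

def levelB (land : List (List Int)) (R C : Int) (visited comp frontier : PySem.Set (Int × Int)) :
    PySem.Set (Int × Int) :=
  frontier.foldl (fun new c => (nbrsB c.1 c.2).foldl (stepB land R C comp visited) new)
    PySem.Set.empty

-- `while True:` — fuel is only a totality guard, never reached on runs from `solution_alt`
def growB (land : List (List Int)) (R C : Int) (visited : PySem.Set (Int × Int)) :
    Nat → PySem.Set (Int × Int) → PySem.Set (Int × Int) → PySem.Set (Int × Int)
  | 0, comp, _ => comp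
  | fuel + 1, comp, frontier =>
      let new := levelB land R C visited comp frontier
      if new = [] then comp
      else growB land R C visited fuel (PySem.Set.union comp new) new

def solution_alt (land : List (List Int)) : Int :=
  let R : Int := land.length
  let C : Int := (PySem.List.pyGetD land 0 []).length
  let fin := (PySem.List.pyRange 0 R 1).foldl
    (fun (st : PySem.Set (Int × Int) × List Int) cy =>
      (PySem.List.pyRange 0 C 1).foldl
        (fun (st : PySem.Set (Int × Int) × List Int) cx =>
          if PySem.Set.contains st.1 (cy, cx) = true ∨ landAt land cy cx = 0 then st
          else
            let comp := growB land R C st.1 ((R * C).toNat + 1)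
                (PySem.Set.add PySem.Set.empty (cy, cx)) (PySem.Set.add PySem.Set.empty (cy, cx))
            let cnt : Int := comp.length
            (PySem.Set.union st.1 comp,
             (PySem.Set.ofList (comp.map Prod.snd) : List Int).foldl
               (fun m x => PySem.List.pySetD m x (PySem.List.pyGetD m x 0 + cnt)) st.2))
        st)
    (PySem.Set.empty, List.replicate C.toNat (0 : Int))
  match PySem.List.max? fin.2 (fun v => v) with
  | some m => m
  | none => 0

-- ===== PRECONDITION & SPEC =====
-- Pre_ is exactly where the Python A returns normally: A raises IndexError when the grid is
-- empty or some row is shorter than the first row (every cell of the first-row width is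
-- inspected), and ValueError (max of an empty list) when the first row is empty.
def Pre_solution (land : List (List Int)) : Prop :=
  land ≠ [] ∧ 0 < (land.headD []).length ∧ ∀ row ∈ land, (land.headD []).length ≤ row.length
instance (land : List (List Int)) : Decidable (Pre_solution land) := by
  unfold Pre_solution; infer_instance

def pvWitness_solution : List (List Int) := [[1, 0, 1], [1, 1, 0]]

def Spec_solution (land : List (List Int)) (out : Int) : Prop := out = solution_alt land
instance (land : List (List Int)) (out : Int) : Decidable (Spec_solution land out) := by
  unfold Spec_solution; infer_instance

-- ===== CLAIM (what is proved, stated in full; the proofs are below) =====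
def Claim_equal_solution : Prop :=
  ∀ (land : List (List Int)), Dom_solution land → Pre_solution land →
    Spec_solution land (solution land)

-- ===== LEMMAS AND PROOFS =====

-- in-grid coordinates
def inG (R C : Int) (c : Int × Int) : Prop := 0 ≤ c.1 ∧ c.1 < R ∧ 0 ≤ c.2 ∧ c.2 < C

-- the visited matrix keeps shape R.toNat × C.toNat
def Dims (R C : Int) (vis : List (List Bool)) : Prop :=
  vis.length = R.toNat ∧ ∀ row ∈ vis, row.length = C.toNat

-- relation between A's BFS state and B's frontier state, for a fixed pre-visited set V and
-- component-so-far comp; `new` is the part of the current level discovered so far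
def LRel (R C : Int) (V comp : List (Int × Int)) (new : PySem.Set (Int × Int))
    (s : List (Int × Int) × List (List Bool) × Int × PySem.Set Int) : Prop :=
  s.1 = new ∧ Dims R C s.2.1 ∧
  (∀ y x, inG R C (y, x) →
    (mgetA s.2.1 y x = true ↔ ((y, x) ∈ V ∨ (y, x) ∈ comp ∨ (y, x) ∈ new))) ∧
  s.2.2.1 = (comp.length : Int) + (new.length : Int) ∧
  s.2.2.2 = PySem.Set.ofList ((comp ++ new).map Prod.snd) ∧
  new.Nodup ∧ (∀ c ∈ new, inG R C c ∧ c ∉ comp)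

theorem dims_replicate (R C : Int) :
    Dims R C (List.replicate R.toNat (List.replicate C.toNat false)) := by
  refine ⟨by simp, ?_⟩
  intro row hr
  simp [List.eq_of_mem_replicate hr]

theorem pyGetD_mem_or {α : Type} (xs : List α) (i : Int) (d : α) :
    PySem.List.pyGetD xs i d ∈ xs ∨ PySem.List.pyGetD xs i d = d := by
  unfold PySem.List.pyGetD PySem.List.pyGet?
  cases h : (PySem.List.pyIdx? xs.length i).bind fun k => xs[k]? with
  | none => right; rfl
  | some v =>
    left
    rcases Option.bind_eq_some_iff.mp h with ⟨k, _, hv⟩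
    exact List.mem_of_getElem? hv

theorem mget_replicate (r c : Nat) (y x : Int) :
    mgetA (List.replicate r (List.replicate c false)) y x = false := by
  unfold mgetA
  rcases pyGetD_mem_or (List.replicate r (List.replicate c false)) y [] with h | h
  · rw [List.eq_of_mem_replicate h]
    rcases pyGetD_mem_or (List.replicate c false) x false with h2 | h2
    · exact List.eq_of_mem_replicate h2
    · exact h2
  · rw [h]
    rcases pyGetD_mem_or ([] : List Bool) x false with h2 | h2
    · cases h2
    · exact h2

theorem mget_eq (vis : List (List Bool)) {y x : Int} (hy : 0 ≤ y) (hx : 0 ≤ x) :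
    mgetA vis y x = (vis.getD y.toNat []).getD x.toNat false := by
  unfold mgetA
  rw [PySem.List.pyGetD_of_nonneg vis [] hy, PySem.List.pyGetD_of_nonneg _ false hx]

theorem mset_eq (vis : List (List Bool)) {y x : Int} (hy : 0 ≤ y) (hx : 0 ≤ x) :
    msetA vis y x = vis.set y.toNat ((vis.getD y.toNat []).set x.toNat true) := by
  unfold msetA
  rw [PySem.List.pyGetD_of_nonneg vis [] hy, PySem.List.pySetD_of_nonneg _ true hx,
    PySem.List.pySetD_of_nonneg _ _ hy]

theorem dims_mset {R C : Int} {vis : List (List Bool)} (h : Dims R C vis) (y x : Int)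
    (hg : inG R C (y, x)) : Dims R C (msetA vis y x) := by
  obtain ⟨hy, hyR, hx, hxC⟩ := hg
  obtain ⟨hlen, hrows⟩ := h
  rw [mset_eq vis hy hx]
  refine ⟨by simpa using hlen, ?_⟩
  intro row hr
  rcases List.mem_or_eq_of_mem_set hr with h1 | h1
  · exact hrows _ h1
  · subst h1
    have hn : y.toNat < vis.length := by simp only at hy hyR ⊢; omega
    rw [List.length_set, List.getD_eq_getElem _ _ hn]
    exact hrows _ (List.getElem_mem hn)

theorem mget_mset {R C : Int} {vis : List (List Bool)} (h : Dims R C vis) {y x y' x' : Int}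
    (hy : 0 ≤ y) (hyR : y < R) (hx : 0 ≤ x) (hxC : x < C)
    (hy' : 0 ≤ y') (hyR' : y' < R) (hx' : 0 ≤ x') (hxC' : x' < C) :
    mgetA (msetA vis y x) y' x' = if y' = y ∧ x' = x then true else mgetA vis y' x' := by
  obtain ⟨hlen, hrows⟩ := h
  have hn : y.toNat < vis.length := by omega
  rw [mset_eq vis hy hx, mget_eq _ hy' hx', mget_eq vis hy' hx']
  by_cases hyy : y' = y
  · have hyn : y'.toNat = y.toNat := by omega
    have hrow : (vis.set y.toNat ((vis.getD y.toNat []).set x.toNat true)).getD y'.toNat []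
        = (vis.getD y.toNat []).set x.toNat true := by
      rw [List.getD_eq_getElem?_getD, hyn, List.getElem?_set_self hn]; rfl
    rw [hrow]
    by_cases hxx : x' = x
    · have hxn : x'.toNat = x.toNat := by omega
      have hm : x.toNat < (vis.getD y.toNat []).length := by
        rw [List.getD_eq_getElem _ _ hn, hrows _ (List.getElem_mem hn)]; omega
      rw [List.getD_eq_getElem?_getD, hxn, List.getElem?_set_self hm]
      simp [hyy, hxx]
    · have hne : x.toNat ≠ x'.toNat := by omega
      rw [List.getD_eq_getElem?_getD, List.getElem?_set_ne hne, ← List.getD_eq_getElem?_getD]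
      simp [hxx, hyy, List.getD_eq_getElem?_getD]
  · have hne : y.toNat ≠ y'.toNat := by omega
    have houter : (vis.set y.toNat ((vis.getD y.toNat []).set x.toNat true)).getD y'.toNat []
        = vis.getD y'.toNat [] := by
      rw [List.getD_eq_getElem?_getD, List.getElem?_set_ne hne, ← List.getD_eq_getElem?_getD]
    rw [houter]
    simp [hyy]

theorem contains_eq_false_iff {α : Type} [BEq α] [LawfulBEq α] (s : PySem.Set α) (x : α) :
    PySem.Set.contains s x = false ↔ x ∉ s := by
  simp [PySem.Set.contains]

theorem set_add_of_mem {α : Type} [BEq α] [LawfulBEq α] {s : PySem.Set α} {x : α} (h : x ∈ s) :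
    PySem.Set.add s x = s := by
  simp [PySem.Set.add, PySem.Set.contains, h]

theorem set_add_of_not_mem {α : Type} [BEq α] [LawfulBEq α] {s : PySem.Set α} {x : α}
    (h : x ∉ s) : PySem.Set.add s x = s ++ [x] := by
  simp [PySem.Set.add, PySem.Set.contains, h]

theorem set_ofList_append_singleton {α : Type} [BEq α] (l : List α) (a : α) :
    PySem.Set.ofList (l ++ [a]) = PySem.Set.add (PySem.Set.ofList l) a := by
  simp [PySem.Set.ofList, List.foldl_append]

theorem set_union_append {α : Type} [BEq α] [LawfulBEq α] :
    ∀ (t s : List α), t.Nodup → (∀ x ∈ t, x ∉ s) → PySem.Set.union s t = s ++ t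
  | [], s, _, _ => by simp [PySem.Set.union, PySem.Set.update]
  | x :: t', s, hn, hd => by
    have h1 : PySem.Set.add s x = s ++ [x] := set_add_of_not_mem (hd x (by simp))
    have h2 := set_union_append t' (s ++ [x]) hn.of_cons ?_
    · simpa [PySem.Set.union, PySem.Set.update, h1] using h2
    · intro y hy
      simp only [List.mem_append, List.mem_singleton]
      rintro (h | rfl)
      · exact hd y (by simp [hy]) h
      · exact (List.nodup_cons.mp hn).1 hy

-- one candidate cell: A's zip-step and B's neighbour step stay related
theorem step_sim (land : List (List Int)) {R C : Int} {V comp : List (Int × Int)}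
    {new : PySem.Set (Int × Int)}
    {s : List (Int × Int) × List (List Bool) × Int × PySem.Set Int}
    (h : LRel R C V comp new s) (y x : Int) (uv : Int × Int) :
    LRel R C V comp (stepB land R C comp V new (y + uv.1, x + uv.2))
      (stepA land R C y x s uv) := by
  obtain ⟨h1, h2, h3, h4, h5, h6, h7⟩ := h
  simp only [stepA, stepB]
  split_ifs with hB hA hA
  · -- both push
    obtain ⟨hy, hyR, hx, hxC, hmg, hld⟩ := hA
    obtain ⟨_, _, _, _, hc, hv, _⟩ := hB
    rw [contains_eq_false_iff] at hc hv
    have hnew : (y + uv.1, x + uv.2) ∉ new := by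
      intro hmem
      have := (h3 _ _ ⟨hy, hyR, hx, hxC⟩).mpr (Or.inr (Or.inr hmem))
      rw [hmg] at this; cases this
    refine ⟨?_, dims_mset h2 _ _ ⟨hy, hyR, hx, hxC⟩, ?_, ?_, ?_, ?_, ?_⟩
    · rw [h1, set_add_of_not_mem hnew]
    · intro y' x' hg'
      obtain ⟨hy', hyR', hx', hxC'⟩ := hg'
      rw [mget_mset h2 hy hyR hx hxC hy' hyR' hx' hxC']
      rw [set_add_of_not_mem hnew]
      by_cases hyx : y' = y + uv.1 ∧ x' = x + uv.2
      · simp only [hyx, and_self, if_true, true_iff]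
        right; right
        simp [hyx.1, hyx.2]
      · rw [if_neg hyx]
        rw [h3 y' x' ⟨hy', hyR', hx', hxC'⟩]
        have : ((y', x') ∈ new ++ [(y + uv.1, x + uv.2)]) ↔ (y', x') ∈ new := by
          simp only [List.mem_append, List.mem_singleton, Prod.mk.injEq]
          constructor
          · rintro (h | ⟨ha, hb⟩)
            · exact h
            · exact absurd ⟨ha, hb⟩ hyx
          · exact Or.inl
        rw [this]
    · rw [h4, set_add_of_not_mem hnew, List.length_append]
      simp only [List.length_singleton]
      push_cast
      ring
    · rw [h5, set_add_of_not_mem hnew]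
      simp only [List.map_append, List.map_cons, List.map_nil, ← List.append_assoc]
      rw [set_ofList_append_singleton]
    · rw [set_add_of_not_mem hnew]
      refine List.Nodup.append h6 (List.nodup_singleton _) ?_
      intro d hd1 hd2
      rw [List.mem_singleton] at hd2
      subst hd2
      exact hnew hd1
    · rw [set_add_of_not_mem hnew]
      intro d hd
      rcases List.mem_append.mp hd with hd | hd
      · exact h7 d hd
      · rw [List.mem_singleton.mp hd]
        exact ⟨⟨hy, hyR, hx, hxC⟩, hc⟩
  · -- B pushes (candidate fresh for B) but A skips: candidate already in `new`; add is a no-op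
    obtain ⟨hy, hyR, hx, hxC, hc, hv, hld⟩ := hB
    rw [contains_eq_false_iff] at hc hv
    have hmem : (y + uv.1, x + uv.2) ∈ new := by
      by_contra hmem
      have hmg : mgetA s.2.1 (y + uv.1) (x + uv.2) = false := by
        rw [← Bool.not_eq_true, h3 _ _ ⟨hy, hyR, hx, hxC⟩]
        rintro (h | h | h)
        · exact hv h
        · exact hc h
        · exact hmem h
      exact hA ⟨hy, hyR, hx, hxC, hmg, hld⟩
    rw [set_add_of_mem hmem]
    exact ⟨h1, h2, h3, h4, h5, h6, h7⟩
  · -- A pushes but B skips: impossible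
    exfalso
    obtain ⟨hy, hyR, hx, hxC, hmg, hld⟩ := hA
    have hnot : ¬((y + uv.1, x + uv.2) ∈ V ∨ (y + uv.1, x + uv.2) ∈ comp ∨
        (y + uv.1, x + uv.2) ∈ new) := by
      intro hmem
      have := (h3 _ _ ⟨hy, hyR, hx, hxC⟩).mpr hmem
      rw [hmg] at this; cases this
    push Not at hnot
    exact hB ⟨hy, hyR, hx, hxC, (contains_eq_false_iff _ _).mpr hnot.2.1,
      (contains_eq_false_iff _ _).mpr hnot.1, hld⟩
  · exact ⟨h1, h2, h3, h4, h5, h6, h7⟩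

-- one whole cell (all four candidates)
theorem cell_sim (land : List (List Int)) {R C : Int} {V comp : List (Int × Int)} (y x : Int) :
    ∀ (offs : List (Int × Int)) (new : PySem.Set (Int × Int))
      (s : List (Int × Int) × List (List Bool) × Int × PySem.Set Int), LRel R C V comp new s →
      LRel R C V comp
        (offs.foldl (fun n uv => stepB land R C comp V n (y + uv.1, x + uv.2)) new)
        (offs.foldl (stepA land R C y x) s) := by
  intro offs
  induction offs with
  | nil => intro new s h; exact h
  | cons uv offs ih =>
    intro new s h
    exact ih _ _ (step_sim land h y x uv)

theorem nbrsB_eq (y x : Int) :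
    nbrsB y x = offsA.map (fun uv => (y + uv.1, x + uv.2)) := by
  simp [nbrsB, offsA, sub_eq_add_neg]

-- a whole level: A processing the queue cells = B building `new`
theorem level_sim (land : List (List Int)) {R C : Int} {V comp : List (Int × Int)}
    (L : List (Int × Int)) :
    ∀ (new : PySem.Set (Int × Int))
      (s : List (Int × Int) × List (List Bool) × Int × PySem.Set Int), LRel R C V comp new s →
      LRel R C V comp
        (L.foldl (fun n c => (nbrsB c.1 c.2).foldl (stepB land R C comp V) n) new)
        (L.foldl (fun s c => List.foldl (stepA land R C c.1 c.2) s offsA) s) := by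
  induction L with
  | nil => intro new s h; exact h
  | cons c L ih =>
    intro new s h
    simp only [List.foldl_cons]
    rw [nbrsB_eq, List.foldl_map]
    exact ih _ _ (cell_sim land c.1 c.2 offsA new s h)

-- A's step on a queue `q0 ++ D` only appends after `q0`
theorem stepA_shift (land : List (List Int)) (R C y x : Int) (offs : List (Int × Int)) :
    ∀ (q0 D : List (Int × Int)) (vis : List (List Bool)) (cnt : Int) (cols : PySem.Set Int),
      offs.foldl (stepA land R C y x) (q0 ++ D, vis, cnt, cols)
        = ((q0 ++ (offs.foldl (stepA land R C y x) (D, vis, cnt, cols)).1,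
            (offs.foldl (stepA land R C y x) (D, vis, cnt, cols)).2)) := by
  induction offs with
  | nil => intro q0 D vis cnt cols; rfl
  | cons uv offs ih =>
    intro q0 D vis cnt cols
    simp only [List.foldl_cons]
    by_cases hc : 0 ≤ y + uv.1 ∧ y + uv.1 < R ∧ 0 ≤ x + uv.2 ∧ x + uv.2 < C ∧
        mgetA vis (y + uv.1) (x + uv.2) = false ∧ landAt land (y + uv.1) (x + uv.2) = 1
    · have e1 : stepA land R C y x (q0 ++ D, vis, cnt, cols) uv
          = (q0 ++ (D ++ [(y + uv.1, x + uv.2)]), msetA vis (y + uv.1) (x + uv.2), cnt + 1,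
             PySem.Set.add cols (x + uv.2)) := by
        simp only [stepA, if_pos hc, List.append_assoc]
      have e2 : stepA land R C y x (D, vis, cnt, cols) uv
          = (D ++ [(y + uv.1, x + uv.2)], msetA vis (y + uv.1) (x + uv.2), cnt + 1,
             PySem.Set.add cols (x + uv.2)) := by
        simp only [stepA, if_pos hc]
      rw [e1, e2, ih]
    · have e1 : stepA land R C y x (q0 ++ D, vis, cnt, cols) uv = (q0 ++ D, vis, cnt, cols) := by
        simp only [stepA, if_neg hc]
      have e2 : stepA land R C y x (D, vis, cnt, cols) uv = (D, vis, cnt, cols) := by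
        simp only [stepA, if_neg hc]
      rw [e1, e2, ih]

-- running bfsA through the first L queue entries = folding the per-cell step over L
theorem bfsA_levels (land : List (List Int)) (R C : Int) :
    ∀ (L q : List (Int × Int)) (f : Nat) (vis : List (List Bool)) (cnt : Int)
      (cols : PySem.Set Int),
      bfsA land R C (f + L.length) (L ++ q) vis cnt cols
        = (fun s => bfsA land R C f s.1 s.2.1 s.2.2.1 s.2.2.2)
            (L.foldl (fun s c => List.foldl (stepA land R C c.1 c.2) s offsA) (q, vis, cnt, cols)) := by
  intro L
  induction L with
  | nil => intro q f vis cnt cols; simp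
  | cons c L ih =>
    intro q f vis cnt cols
    obtain ⟨cy, cx⟩ := c
    have hfuel : f + ((cy, cx) :: L).length = (f + L.length) + 1 := by simp; omega
    rw [hfuel]
    show bfsA land R C ((f + L.length) + 1) ((cy, cx) :: (L ++ q)) vis cnt cols = _
    rw [bfsA]
    have hsh := stepA_shift land R C cy cx offsA L q vis cnt cols
    rw [hsh]
    have := ih ((List.foldl (stepA land R C cy cx) (q, vis, cnt, cols) offsA).1) (f)
      ((List.foldl (stepA land R C cy cx) (q, vis, cnt, cols) offsA).2.1)
      ((List.foldl (stepA land R C cy cx) (q, vis, cnt, cols) offsA).2.2.1)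
      ((List.foldl (stepA land R C cy cx) (q, vis, cnt, cols) offsA).2.2.2)
    simp only [List.foldl_cons]
    simpa using this

-- the product list of all grid cells
def gridL (R C : Int) : List (Int × Int) :=
  (PySem.List.pyRange 0 R 1).flatMap
      (fun cy => (PySem.List.pyRange 0 C 1).map (fun cx => (cy, cx)))

theorem mem_gridL (R C : Int) (c : Int × Int) : c ∈ gridL R C ↔ inG R C c := by
  obtain ⟨cy, cx⟩ := c
  simp [gridL, List.mem_flatMap, List.mem_map, PySem.List.mem_pyRange_one, inG]
  aesop

theorem growB_succ (land : List (List Int)) (R C : Int) (V : PySem.Set (Int × Int))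
    (fuel : Nat) (comp frontier : PySem.Set (Int × Int)) :
    growB land R C V (fuel + 1) comp frontier
      = if levelB land R C V comp frontier = [] then comp
        else growB land R C V fuel (PySem.Set.union comp (levelB land R C V comp frontier))
               (levelB land R C V comp frontier) := rfl

-- the main simulation: one BFS of A = one growB of B
theorem bfs_sim (land : List (List Int)) (R C : Int) :
    ∀ (fb fa : Nat) (V comp frontier : List (Int × Int)) (vis : List (List Bool)) (cnt : Int)
      (cols : PySem.Set Int),
      LRel R C V comp [] ([], vis, cnt, cols) →
      comp.Nodup → (∀ c ∈ comp, inG R C c) →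
      frontier.length + (gridL R C).length ≤ fa + comp.length →
      (gridL R C).length + 1 ≤ fb + comp.length →
      (fun r compF =>
        Dims R C r.1 ∧
        (∀ y x, inG R C (y, x) → (mgetA r.1 y x = true ↔ (y, x) ∈ V ∨ (y, x) ∈ compF)) ∧
        r.2.1 = (compF.length : Int) ∧
        r.2.2 = PySem.Set.ofList (compF.map Prod.snd) ∧
        compF.Nodup ∧ (∀ c ∈ compF, inG R C c))
        (bfsA land R C fa frontier vis cnt cols)
        (growB land R C V fb comp frontier) := by
  intro fb
  induction fb with
  | zero =>
    intro fa V comp frontier vis cnt cols hrel hnd hgrid hfa hfb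
    exfalso
    have hle : comp.length ≤ (gridL R C).length :=
      (List.subperm_of_subset hnd (fun c hc => (mem_gridL R C c).mpr (hgrid c hc))).length_le
    omega
  | succ fb ih =>
    intro fa V comp frontier vis cnt cols hrel hnd hgrid hfa hfb
    have hle : comp.length ≤ (gridL R C).length :=
      (List.subperm_of_subset hnd (fun c hc => (mem_gridL R C c).mpr (hgrid c hc))).length_le
    have hflen : frontier.length ≤ fa := by omega
    have hrel2 := level_sim land frontier PySem.Set.empty ([], vis, cnt, cols) hrel
    have hlev := bfsA_levels land R C frontier [] (fa - frontier.length) vis cnt cols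
    rw [List.append_nil, Nat.sub_add_cancel hflen] at hlev
    obtain ⟨e1, e2, e3, e4, e5, e6, e7⟩ := hrel2
    have hnewdef : (frontier.foldl
        (fun n c => (nbrsB c.1 c.2).foldl (stepB land R C comp V) n) PySem.Set.empty)
        = levelB land R C V comp frontier := rfl
    rw [hnewdef] at e1 e3 e4 e5 e6 e7
    by_cases hnew : levelB land R C V comp frontier = []
    · have hgrow : growB land R C V (fb + 1) comp frontier = comp := by
        rw [growB_succ, if_pos hnew]
      rw [hgrow, hlev]
      dsimp only
      rw [e1, hnew, bfsA]
      rw [hnew] at e3 e4 e5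
      refine ⟨e2, ?_, ?_, ?_, hnd, hgrid⟩
      · intro y x hg
        rw [e3 y x hg]
        simp
      · rw [e4]; simp
      · rw [e5]; simp
    · have hdisj : ∀ c ∈ levelB land R C V comp frontier, c ∉ comp := fun c hc => (e7 c hc).2
      have hunion : PySem.Set.union comp (levelB land R C V comp frontier)
          = comp ++ levelB land R C V comp frontier := set_union_append _ _ e6 hdisj
      have hlen1 : 1 ≤ (levelB land R C V comp frontier).length :=
        List.length_pos_iff.mpr hnew
      have s1 : LRel R C V (comp ++ levelB land R C V comp frontier) []
          ([], (frontier.foldl (fun s c => List.foldl (stepA land R C c.1 c.2) s offsA)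
            ([], vis, cnt, cols)).2.1,
           (frontier.foldl (fun s c => List.foldl (stepA land R C c.1 c.2) s offsA)
            ([], vis, cnt, cols)).2.2.1,
           (frontier.foldl (fun s c => List.foldl (stepA land R C c.1 c.2) s offsA)
            ([], vis, cnt, cols)).2.2.2) := by
        refine ⟨rfl, e2, ?_, ?_, ?_, List.nodup_nil, by simp⟩
        · intro y x hg
          rw [e3 y x hg]
          simp [List.mem_append]
        · rw [e4, List.length_append]
          push_cast
          simp
        · rw [e5]
          simp
      have s2 : (comp ++ levelB land R C V comp frontier).Nodup :=
        List.Nodup.append hnd e6 (fun a ha hb => hdisj a hb ha)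
      have s3 : ∀ c ∈ comp ++ levelB land R C V comp frontier, inG R C c := by
        intro c hc
        rcases List.mem_append.mp hc with hc | hc
        · exact hgrid c hc
        · exact (e7 c hc).1
      have s4 : (levelB land R C V comp frontier).length + (gridL R C).length
          ≤ (fa - frontier.length) + (comp ++ levelB land R C V comp frontier).length := by
        rw [List.length_append]
        omega
      have s5 : (gridL R C).length + 1
          ≤ fb + (comp ++ levelB land R C V comp frontier).length := by
        rw [List.length_append]
        omega
      have hih := ih (fa - frontier.length) V (comp ++ levelB land R C V comp frontier)
        (levelB land R C V comp frontier) _ _ _ s1 s2 s3 s4 s5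
      have hgrow : growB land R C V (fb + 1) comp frontier
          = growB land R C V fb (comp ++ levelB land R C V comp frontier)
              (levelB land R C V comp frontier) := by
        rw [growB_succ, if_neg hnew, hunion]
      rw [hgrow, hlev]
      dsimp only
      rw [e1]
      exact hih

theorem toNat_mul_le (R C : Int) : R.toNat * C.toNat ≤ (R * C).toNat := by
  by_cases hR : 0 ≤ R
  · by_cases hC : 0 ≤ C
    · have h1 : R * C = ((R.toNat * C.toNat : Nat) : Int) := by
        push_cast
        rw [Int.toNat_of_nonneg hR, Int.toNat_of_nonneg hC]
      rw [h1, Int.toNat_natCast]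
    · have h0 : C.toNat = 0 := by omega
      simp [h0]
  · have h0 : R.toNat = 0 := by omega
    simp [h0]

theorem gridL_length (R C : Int) : (gridL R C).length = R.toNat * C.toNat := by
  simp [gridL, PySem.List.length_pyRange_one]

-- outer loop relation
def ORel (R C : Int) (stA : List (List Bool) × List Int)
    (stB : PySem.Set (Int × Int) × List Int) : Prop :=
  Dims R C stA.1 ∧
  (∀ y x, inG R C (y, x) → (mgetA stA.1 y x = true ↔ (y, x) ∈ stB.1)) ∧ stA.2 = stB.2

theorem outer_sim (land : List (List Int)) (R C : Int) :
    ∀ (cells : List (Int × Int)), (∀ c ∈ cells, inG R C c) →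
    ∀ stA stB, ORel R C stA stB →
      ORel R C
        (cells.foldl
          (fun (st : List (List Bool) × List Int) c =>
            if mgetA st.1 c.1 c.2 = true ∨ landAt land c.1 c.2 = 0 then st
            else
              let r := bfsA land R C ((R * C).toNat + 1) [(c.1, c.2)] (msetA st.1 c.1 c.2) 1
                         (PySem.Set.add PySem.Set.empty c.2)
              (r.1, (r.2.2 : List Int).foldl
                (fun m x => PySem.List.pySetD m x (PySem.List.pyGetD m x 0 + r.2.1)) st.2)) stA)
        (cells.foldl
          (fun (st : PySem.Set (Int × Int) × List Int) c =>
            if PySem.Set.contains st.1 (c.1, c.2) = true ∨ landAt land c.1 c.2 = 0 then st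
            else
              let comp := growB land R C st.1 ((R * C).toNat + 1)
                  (PySem.Set.add PySem.Set.empty (c.1, c.2))
                  (PySem.Set.add PySem.Set.empty (c.1, c.2))
              let cnt : Int := comp.length
              (PySem.Set.union st.1 comp,
               (PySem.Set.ofList (comp.map Prod.snd) : List Int).foldl
                 (fun m x => PySem.List.pySetD m x (PySem.List.pyGetD m x 0 + cnt)) st.2)) stB) := by
  intro cells
  induction cells with
  | nil => intro _ stA stB h; exact h
  | cons c cs ih =>
    intro hcells stA stB h
    obtain ⟨hd, hm, hmemo⟩ := h
    have hg : inG R C (c.1, c.2) := hcells c (by simp)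
    simp only [List.foldl_cons]
    by_cases hguard : (c.1, c.2) ∈ stB.1 ∨ landAt land c.1 c.2 = 0
    · -- both skip
      have hA : mgetA stA.1 c.1 c.2 = true ∨ landAt land c.1 c.2 = 0 := by
        rcases hguard with hgu | hgu
        · exact Or.inl ((hm c.1 c.2 hg).mpr hgu)
        · exact Or.inr hgu
      have hB : PySem.Set.contains stB.1 (c.1, c.2) = true ∨ landAt land c.1 c.2 = 0 := by
        rcases hguard with hgu | hgu
        · exact Or.inl (by simpa [PySem.Set.contains] using hgu)
        · exact Or.inr hgu
      rw [if_pos hA, if_pos hB]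
      exact ih (fun d hdm => hcells d (by simp [hdm])) stA stB ⟨hd, hm, hmemo⟩
    · have hA : ¬(mgetA stA.1 c.1 c.2 = true ∨ landAt land c.1 c.2 = 0) := by
        rintro (hgu | hgu)
        · exact hguard (Or.inl ((hm c.1 c.2 hg).mp hgu))
        · exact hguard (Or.inr hgu)
      have hB : ¬(PySem.Set.contains stB.1 (c.1, c.2) = true ∨ landAt land c.1 c.2 = 0) := by
        rintro (hgu | hgu)
        · exact hguard (Or.inl (by simpa [PySem.Set.contains] using hgu))
        · exact hguard (Or.inr hgu)
      rw [if_neg hA, if_neg hB]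
      have hnotmem : (c.1, c.2) ∉ stB.1 := fun hmm => hguard (Or.inl hmm)
      obtain ⟨hy, hyR, hx, hxC⟩ := hg
      -- entry invariant for the BFS simulation
      have hrel : LRel R C stB.1 [(c.1, c.2)] []
          ([], msetA stA.1 c.1 c.2, 1, PySem.Set.add PySem.Set.empty c.2) := by
        refine ⟨rfl, dims_mset hd _ _ ⟨hy, hyR, hx, hxC⟩, ?_, by simp, by simp [PySem.Set.ofList], by simp, by simp⟩
        intro y x hg'
        obtain ⟨hy', hyR', hx', hxC'⟩ := hg'
        rw [mget_mset hd hy hyR hx hxC hy' hyR' hx' hxC']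
        by_cases hyx : y = c.1 ∧ x = c.2
        · simp only [hyx, and_self, if_true, true_iff]
          right; left
          simp
        · rw [if_neg hyx]
          rw [hm y x ⟨hy', hyR', hx', hxC'⟩]
          simp only [List.mem_singleton, List.not_mem_nil, or_false, Prod.mk.injEq]
          constructor
          · exact Or.inl
          · rintro (hmm | hmm)
            · exact hmm
            · exact absurd hmm hyx
      have hfuel : (gridL R C).length ≤ (R * C).toNat := by
        rw [gridL_length]
        exact toNat_mul_le R C
      have hsim := bfs_sim land R C ((R * C).toNat + 1) ((R * C).toNat + 1) stB.1
        [(c.1, c.2)] [(c.1, c.2)] (msetA stA.1 c.1 c.2) 1 (PySem.Set.add PySem.Set.empty c.2)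
        hrel (by simp) (by simpa using ⟨hy, hyR, hx, hxC⟩) (by simp; omega) (by simp; omega)
      have hstart : PySem.Set.add PySem.Set.empty (c.1, c.2) = [(c.1, c.2)] := rfl
      rw [hstart]
      obtain ⟨p1, p2, p3, p4, p5, p6⟩ := hsim
      apply ih (fun d hdm => hcells d (by simp [hdm]))
      refine ⟨p1, ?_, ?_⟩
      · intro y x hg'
        rw [PySem.Set.mem_union]
        exact p2 y x hg'
      · rw [hmemo, p3, p4]
  

-- ===== VERDICT (by name: the statement is the Claim_ definition above) =====
theorem foldl_gridL {σ : Type} (R C : Int) (g : σ → (Int × Int) → σ) (init : σ) :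
    (gridL R C).foldl g init
      = (PySem.List.pyRange 0 R 1).foldl
          (fun acc cy => (PySem.List.pyRange 0 C 1).foldl (fun a cx => g a (cy, cx)) acc) init := by
  rw [gridL, List.foldl_flatMap]
  simp only [List.foldl_map]

theorem solution_spec : Claim_equal_solution := by
  intro land _ _
  show solution land = solution_alt land
  unfold solution solution_alt
  have h1 := outer_sim land (land.length : Int) ((PySem.List.pyGetD land 0 []).length : Int)
      (gridL (land.length : Int) ((PySem.List.pyGetD land 0 []).length : Int))
      (fun c hc => (mem_gridL _ _ c).mp hc)
      (List.replicate ((land.length : Int)).toNat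
        (List.replicate (((PySem.List.pyGetD land 0 []).length : Int)).toNat false),
       List.replicate (((PySem.List.pyGetD land 0 []).length : Int)).toNat (0 : Int))
      (PySem.Set.empty,
       List.replicate (((PySem.List.pyGetD land 0 []).length : Int)).toNat (0 : Int))
      ⟨dims_replicate _ _, by intro y x _; simp [mget_replicate], rfl⟩
  obtain ⟨-, -, hmemo⟩ := h1
  conv at hmemo => rhs; rw [foldl_gridL]
  unfold gridL at hmemo
  dsimp only at hmemo ⊢
  rw [hmemo]
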